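-- pv_equiv track=rewrite | github.com/PulyaPolya/oop_lab2 | PycharmProjects/mathematiko/win_combinations.py | check_comb
-- ===== SOURCE A (Python) =====
-- import collections
--
-- def check_comb(array, diag = 0):
--     list_4 = [item for item, count in collections.Counter(array).items() if count == 4]
--     list_3 = [item for item, count in collections.Counter(array).items() if count == 3]
--     list_2 = [item for item, count in collections.Counter(array).items() if count == 2]
--     if len(list_2) == 2:
--         if diag == 0:
--             return 20 #'2+2'
--         else:
--             return 30
--     elif  len(list_3) > 0:
--         if len(list_2) > 0:
--             if diag == 0:
--                 return 80 #'3+2'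
--             else:
--                 return 90
--         else:
--             if diag == 0:
--                 return 40 #'3'
--             else:
--                 return 50
--     elif len(list_2) == 1:
--         if diag == 0:
--             return 10 #'2'
--         else:
--             return 20
--     elif len(list_4) > 0:
--         if array[0] == 1 or array[1] ==1: # 1111
--             if diag == 0:
--                 return 200
--             else:
--                 return 210
--         else:
--             if diag == 0: # 4
--                 return 160
--             else:
--                 return 170
--     else:
--         return 0
-- ===== SOURCE B (Python) =====
-- def check_comb(array, diag=0):
--     # Sort-then-run-length-encode instead of Counter passes: scan the sorted list
--     # one maximal run at a time, classify from the multiset of run lengths, and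
--     # add the diag bonus once at the end.
--     xs = sorted(array)
--     lens = []
--     i = 0
--     while i < len(xs):
--         j = i + 1
--         while j < len(xs) and xs[j] == xs[i]:
--             j += 1
--         lens.append(j - i)
--         i = j
--     p, t, q = lens.count(2), lens.count(3), lens.count(4)
--     if p == 2:
--         base = 20
--     elif t:
--         base = 80 if p else 40
--     elif p == 1:
--         base = 10
--     elif q:
--         base = 200 if 1 in array[:2] else 160
--     else:
--         base = 0
--     return base + 10 if base and diag else base
-- ===== Notes on version B (the rewrite author's own statement) =====
-- stated objective: alternative
-- what changed: B sorts the array and recursively run-length-encodes it (peeling one run per recursive call) instead of A's three separate Counter-item passes, classifies from the multiset of run lengths, and adds the diag bonus once at the end instead of duplicating every branch for diag.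
import Mathlib
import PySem

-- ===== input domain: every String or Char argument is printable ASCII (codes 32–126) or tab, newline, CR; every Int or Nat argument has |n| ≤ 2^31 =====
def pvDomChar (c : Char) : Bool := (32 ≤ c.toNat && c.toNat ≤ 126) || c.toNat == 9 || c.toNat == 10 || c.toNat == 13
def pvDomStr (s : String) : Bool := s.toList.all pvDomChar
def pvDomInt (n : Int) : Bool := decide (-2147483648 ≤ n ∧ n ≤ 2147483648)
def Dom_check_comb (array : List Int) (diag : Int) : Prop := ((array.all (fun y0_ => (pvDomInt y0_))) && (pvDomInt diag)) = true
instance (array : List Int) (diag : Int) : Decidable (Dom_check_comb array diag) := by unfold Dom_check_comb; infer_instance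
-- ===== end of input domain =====

-- B replaces A's three Counter passes by sort + run-length encoding (one maximal run per scan step) and
-- a single '+10 if diag' step instead of branch-wise diag duplication (objective: alternative).

-- ===== PORT A =====
-- array[0] / array[1] in A are only reached when some value occurs exactly 4 times, so the
-- list has ≥ 4 elements and pyGet? is some there; .getD 0 is exact on every reachable input.
def check_comb (array : List Int) (diag : Int) : Int :=
  let list_4 := ((PySem.Dict.counter array).items.filter (fun p => p.2 == 4)).map Prod.fst
  let list_3 := ((PySem.Dict.counter array).items.filter (fun p => p.2 == 3)).map Prod.fst
  let list_2 := ((PySem.Dict.counter array).items.filter (fun p => p.2 == 2)).map Prod.fst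
  if list_2.length = 2 then (if diag = 0 then 20 else 30)
  else if list_3.length > 0 then
    (if list_2.length > 0 then (if diag = 0 then 80 else 90)
     else (if diag = 0 then 40 else 50))
  else if list_2.length = 1 then (if diag = 0 then 10 else 20)
  else if list_4.length > 0 then
    (if (PySem.List.pyGet? array 0).getD 0 = 1 ∨ (PySem.List.pyGet? array 1).getD 0 = 1 then
       (if diag = 0 then 200 else 210)
     else (if diag = 0 then 160 else 170))
  else 0

-- ===== PORT B =====
-- Source B's run-length scan over sorted(array): the position i of the outer 'while' is
-- represented by the remaining suffix xs[i:] (exact — i only moves forward), so the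
-- outer loop is recursion peeling one maximal run per step; the inner 'while j' is
-- pvRunPrefix (length of the equal prefix after the run's first element)
def pvRunPrefix (h : Int) : List Int → Nat
  | [] => 0
  | x :: t => if x = h then pvRunPrefix h t + 1 else 0

def pvRunLengths : List Int → List Int
  | [] => []
  | h :: t =>
      ((1 + pvRunPrefix h t : Nat) : Int) :: pvRunLengths (t.drop (pvRunPrefix h t))
  termination_by l => l.length
  decreasing_by simp [List.length_drop]

def check_comb_alt (array : List Int) (diag : Int) : Int :=
  let lens := pvRunLengths (PySem.List.sorted array (fun x => x) false)
  let p := lens.count 2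
  let t := lens.count 3
  let q := lens.count 4
  let base : Int :=
    if p = 2 then 20
    else if t ≠ 0 then (if p ≠ 0 then 80 else 40)
    else if p = 1 then 10
    else if q ≠ 0 then (if (PySem.List.slice array (some 0) (some 2)).contains 1 then 200 else 160)
    else 0
  if base ≠ 0 ∧ diag ≠ 0 then base + 10 else base

-- ===== PRECONDITION & SPEC =====
def Spec_check_comb (array : List Int) (diag : Int) (out : Int) : Prop := out = check_comb_alt array diag
instance (array : List Int) (diag : Int) (out : Int) : Decidable (Spec_check_comb array diag out) := by unfold Spec_check_comb; infer_instance

-- ===== CLAIM (what is proved, stated in full; the proofs are below) =====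
def Claim_equal_check_comb : Prop := ∀ (array : List Int) (diag : Int), Dom_check_comb array diag → Spec_check_comb array diag (check_comb array diag)

-- ===== LEMMAS AND PROOFS =====

theorem pv_take_runPrefix (h : Int) (t : List Int) :
    t.take (pvRunPrefix h t) = List.replicate (pvRunPrefix h t) h := by
  induction t with
  | nil => rfl
  | cons x t ih =>
    by_cases hx : x = h <;> simp [pvRunPrefix, hx, ih, List.replicate_succ]

theorem pv_head_drop (h : Int) (t : List Int) :
    ∀ y r, t.drop (pvRunPrefix h t) = y :: r → y ≠ h := by
  induction t with
  | nil => intro y r hy; simp at hy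
  | cons x t ih =>
    intro y r hy
    by_cases hx : x = h
    · simp [pvRunPrefix, hx] at hy; exact ih y r hy
    · simp [pvRunPrefix, hx] at hy; exact fun hc => hx (hy.1.trans hc)

theorem pv_not_mem_drop (h : Int) (t : List Int) (hp : (h :: t).Pairwise (· ≤ ·)) :
    h ∉ t.drop (pvRunPrefix h t) := by
  cases hd : t.drop (pvRunPrefix h t) with
  | nil => simp
  | cons y r =>
    have hy : y ≠ h := pv_head_drop h t y r hd
    have hsub : List.Sublist (y :: r) t := hd ▸ (List.drop_sublist (pvRunPrefix h t) t)
    have hpt : (y :: r).Pairwise (· ≤ ·) :=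
      ((List.pairwise_cons.1 hp).2).sublist hsub
    have hhy : h ≤ y := (List.pairwise_cons.1 hp).1 y (hsub.mem (by simp))
    intro hm
    rcases List.mem_cons.1 hm with h1 | h2
    · exact hy h1.symm
    · exact hy (le_antisymm ((List.pairwise_cons.1 hpt).1 h h2) hhy)

theorem pv_discard_of_not_mem (s : List Int) (x : Int) (hx : x ∉ s) :
    PySem.Set.discard s x = s := by
  induction s with
  | nil => rfl
  | cons a t ih => simp_all [PySem.Set.discard]; exact fun hc => hx.1 hc.symm

theorem pv_ofList_run (h : Int) (rest : List Int) (m : Nat) (hm : 0 < m) (hr : h ∉ rest) :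
    PySem.Set.ofList (List.replicate m h ++ rest) = h :: PySem.Set.ofList rest := by
  induction m with
  | zero => omega
  | succ m ih =>
    by_cases hm0 : m = 0
    · subst hm0
      have hno : h ∉ PySem.Set.ofList rest := fun hc => hr ((PySem.Set.mem_ofList rest h).1 hc)
      simp [PySem.Set.ofList_cons, pv_discard_of_not_mem _ h hno]
    · have := ih (by omega)
      simp only [List.replicate_succ, List.cons_append, PySem.Set.ofList_cons, this]
      simp [PySem.Set.discard]
      exact fun a ha hc => hr (hc ▸ ha)

theorem pv_count_runLengths (l : List Int) (hp : l.Pairwise (· ≤ ·)) (k : Int) :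
    (pvRunLengths l).count k
      = ((PySem.Set.ofList l).filter (fun v => ((l.count v : Int) == k))).length := by
  induction l using pvRunLengths.induct with
  | case1 => simp [pvRunLengths]
  | case2 h t ih =>
    have hpt : t.Pairwise (· ≤ ·) := (List.pairwise_cons.1 hp).2
    have hnm : h ∉ t.drop (pvRunPrefix h t) := pv_not_mem_drop h t hp
    have hpr : (t.drop (pvRunPrefix h t)).Pairwise (· ≤ ·) :=
      hpt.sublist (List.drop_sublist _ t)
    have hdec : h :: t
        = List.replicate (pvRunPrefix h t + 1) h ++ t.drop (pvRunPrefix h t) := by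
      conv_lhs => rw [← List.take_append_drop (pvRunPrefix h t) t]
      rw [pv_take_runPrefix]
      simp [List.replicate_succ]
    have hofl : PySem.Set.ofList (h :: t)
        = h :: PySem.Set.ofList (t.drop (pvRunPrefix h t)) := by
      rw [hdec]; exact pv_ofList_run h _ _ (by omega) hnm
    have hch : (h :: t).count h = pvRunPrefix h t + 1 := by
      conv_lhs => rw [hdec]
      simp [List.count_append, List.count_eq_zero.2 hnm]
    have hcv : ∀ v, v ≠ h → (h :: t).count v = (t.drop (pvRunPrefix h t)).count v := by
      intro v hv
      conv_lhs => rw [hdec]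
      simp [List.count_append, List.count_replicate, Ne.symm hv]
    rw [pvRunLengths]
    rw [List.count_cons, ih hpr, hofl]
    rw [List.filter_cons]
    have hfc : ((PySem.Set.ofList (t.drop (pvRunPrefix h t))).filter
          (fun v => (((h :: t).count v : Int) == k)))
        = ((PySem.Set.ofList (t.drop (pvRunPrefix h t))).filter
          (fun v => (((t.drop (pvRunPrefix h t)).count v : Int) == k))) := by
      apply List.filter_congr
      intro v hv
      have hvne : v ≠ h := by
        intro hc; subst hc
        exact hnm ((PySem.Set.mem_ofList _ v).1 hv)
      rw [hcv v hvne]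
    rw [hfc, hch]
    by_cases hk : ((pvRunPrefix h t + 1 : Nat) : Int) = k
    · simp [hk, Nat.add_comm]
    · simp only [beq_iff_eq]
      rw [if_neg (by push_cast; push_cast at hk; omega), if_neg (by push_cast at hk ⊢; omega)]
      omega

theorem pv_lenA (xs : List Int) (k : Int) :
    (((PySem.Dict.counter xs).items.filter (fun p => p.2 == k)).map Prod.fst).length
      = ((PySem.Set.ofList xs).filter (fun v => ((xs.count v : Int) == k))).length := by
  simp [PySem.Dict.items_counter, List.filter_map, Function.comp_def]

theorem pv_lenB (xs : List Int) (k : Int) :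
    ((PySem.Set.ofList (PySem.List.sorted xs (fun x => x) false)).filter
        (fun v => (((PySem.List.sorted xs (fun x => x) false).count v : Int) == k))).length
      = ((PySem.Set.ofList xs).filter (fun v => ((xs.count v : Int) == k))).length := by
  have hperm : (PySem.List.sorted xs (fun x => x) false).Perm xs :=
    PySem.List.sorted_perm xs (fun x => x) false
  have hcnt : ∀ v : Int, (PySem.List.sorted xs (fun x => x) false).count v = xs.count v :=
    fun v => hperm.count_eq v
  have hs : (PySem.Set.ofList (PySem.List.sorted xs (fun x => x) false)).Perm
      (PySem.Set.ofList xs) := by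
    rw [List.perm_ext_iff_of_nodup (PySem.Set.nodup_ofList _) (PySem.Set.nodup_ofList _)]
    intro a
    simp [PySem.Set.mem_ofList, hperm.mem_iff]
  simp only [hcnt]
  exact (hs.filter _).length_eq

theorem pv_len_ge (xs : List Int)
    (h : ((PySem.Set.ofList xs).filter (fun v => ((xs.count v : Int) == 4))).length ≠ 0) :
    2 ≤ xs.length := by
  have hne : ((PySem.Set.ofList xs).filter (fun v => ((xs.count v : Int) == 4))) ≠ [] := by
    intro hc; rw [hc] at h; simp at h
  rcases List.exists_mem_of_ne_nil _ hne with ⟨v, hv⟩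
  have hmf := List.of_mem_filter hv
  have hc : xs.count v = 4 := by
    have : (xs.count v : Int) = 4 := by simpa using hmf
    exact_mod_cast this
  have hle : xs.count v ≤ xs.length := List.count_le_length
  omega

theorem pv_first2 (xs : List Int) (hx : 2 ≤ xs.length) :
    ((PySem.List.slice xs (some 0) (some 2)).contains 1 = true)
      ↔ ((PySem.List.pyGet? xs 0).getD 0 = 1 ∨ (PySem.List.pyGet? xs 1).getD 0 = 1) := by
  match xs with
  | [] => simp at hx
  | [a] => simp at hx
  | a :: b :: r =>
    have hsl : PySem.List.slice (a :: b :: r) (some 0) (some 2) = [a, b] := by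
      rw [PySem.List.slice_zero_start, show (2:Int) = ((2:Nat):Int) by norm_num,
        PySem.List.slice_to_natCast]
      rfl
    have hp0 : (0:Int) ≤ (r.length:Int) + 1 := by positivity
    have hg0 : PySem.List.pyGet? (a :: b :: r) 0 = some a := by
      simp [PySem.List.pyGet?, PySem.List.pyIdx?, hp0]
    have hg1 : PySem.List.pyGet? (a :: b :: r) 1 = some b := by
      simp [PySem.List.pyGet?, PySem.List.pyIdx?]
    rw [hsl, hg0, hg1]
    simp
    constructor
    · rintro (h1 | h1) <;> [exact Or.inl h1.symm; exact Or.inr h1.symm]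
    · rintro (h1 | h1) <;> [exact Or.inl h1.symm; exact Or.inr h1.symm]

-- ===== VERDICT (by name: the statement is the Claim_ definition above) =====
set_option maxHeartbeats 1000000 in
theorem check_comb_spec : Claim_equal_check_comb := by
  intro array diag _
  unfold Spec_check_comb check_comb check_comb_alt
  have hpw : (PySem.List.sorted array (fun x => x) false).Pairwise (· ≤ ·) := by
    simpa using PySem.List.sorted_pairwise array (fun x => x)
  have hkey : ∀ k : Int,
      (pvRunLengths (PySem.List.sorted array (fun x => x) false)).count k
        = (((PySem.Dict.counter array).items.filter (fun p => p.2 == k)).map Prod.fst).length := by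
    intro k
    rw [pv_count_runLengths _ hpw k, pv_lenB, ← pv_lenA]
  have hc4 : (((PySem.Dict.counter array).items.filter (fun p => p.2 == (4:Int))).map Prod.fst).length ≠ 0 →
      (((PySem.List.slice array (some 0) (some 2)).contains 1 = true)
        ↔ ((PySem.List.pyGet? array 0).getD 0 = 1 ∨ (PySem.List.pyGet? array 1).getD 0 = 1)) := by
    intro h4
    refine pv_first2 array (pv_len_ge array ?_)
    rw [← pv_lenA]; exact h4
  simp only [hkey]
  split_ifs <;> first | rfl | omega | tauto
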